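-- pv_equiv track=rewrite | github.com/qlever-dev/qlever-control | src/sparql_conformance/tsv_csv_tools.py | _reorder_columns_to_expected
-- ===== SOURCE A (Python) =====
-- def _build_column_mapping(expected_header: list, actual_header: list):
--     """
--     Return a list L which aligns actual[row][L[i]] with expected[row][i].
--     Example: actual: s p o expected: o p s -> L[0] = 2, L[1] = 1, L[2] = 0
--     If no perfect mapping exists, return None.
--     """
--     if len(expected_header) != len(actual_header):
--         return None
--
--     wanted = expected_header
--     have = actual_header
--
--     used = set()
--     mapping = []
--     for name in wanted:
--         idx = None
--         for j, col in enumerate(have):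
--             if j in used:
--                 continue
--             if col.strip() == name.strip():
--                 idx = j
--                 break
--         if idx is None:
--             return None
--         used.add(idx)
--         mapping.append(idx)
--     return mapping
--
-- def _reorder_columns_to_expected(expected_array: list, actual_array: list):
--     """
--     If the first rows (headers) of expected/actual are a permutation of each other,
--     reorder every row of the actual array to match the expected header order.
--     Otherwise, just return actual_array.
--     """
--     if not expected_array or not actual_array:
--         return actual_array
--
--     expected_header = expected_array[0]
--     actual_header = actual_array[0]
--
--     if sorted(expected_header) != sorted(actual_header):
--         return actual_array
--
--     mapping = _build_column_mapping(expected_header, actual_header)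
--     if mapping is None:
--         return actual_array
--
--     def reorder_row(row):
--         return [row[i] if i < len(row) else "" for i in mapping]
--
--     return [reorder_row(r) for r in actual_array]
-- ===== SOURCE B (Python) =====
-- def _build_column_mapping(expected_header: list, actual_header: list):
--     """Occurrence-rank matcher: one global multiset check on the stripped names,
--     then the i-th expected name (the k-th occurrence of its stripped form) is
--     mapped to the k-th position of that stripped form in the actual header."""
--     if len(expected_header) != len(actual_header):
--         return None
--     strips_e = [c.strip() for c in expected_header]
--     strips_a = [c.strip() for c in actual_header]
--     if sorted(strips_e) != sorted(strips_a):
--         return None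
--     return [[j for j, t in enumerate(strips_a) if t == s][strips_e[:i].count(s)]
--             for i, s in enumerate(strips_e)]
--
-- def _reorder_columns_to_expected(expected_array: list, actual_array: list):
--     mapping = None
--     if expected_array and actual_array and sorted(expected_array[0]) == sorted(actual_array[0]):
--         mapping = _build_column_mapping(expected_array[0], actual_array[0])
--     if mapping is None:
--         return actual_array
--     return [[(row[i] if i < len(row) else "") for i in mapping] for row in actual_array]
-- ===== Notes on version B (the rewrite author's own statement) =====
-- stated objective: alternative
-- what changed: The stateful greedy (per-name scan over the header skipping a growing 'used' set) is replaced by a stateless occurrence-rank computation: one global sorted-multiset check on the stripped names decides failure, and position i is mapped directly to the k-th occurrence in the actual header of its stripped name, where k is that name's count in the expected prefix before i.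
import Mathlib
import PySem

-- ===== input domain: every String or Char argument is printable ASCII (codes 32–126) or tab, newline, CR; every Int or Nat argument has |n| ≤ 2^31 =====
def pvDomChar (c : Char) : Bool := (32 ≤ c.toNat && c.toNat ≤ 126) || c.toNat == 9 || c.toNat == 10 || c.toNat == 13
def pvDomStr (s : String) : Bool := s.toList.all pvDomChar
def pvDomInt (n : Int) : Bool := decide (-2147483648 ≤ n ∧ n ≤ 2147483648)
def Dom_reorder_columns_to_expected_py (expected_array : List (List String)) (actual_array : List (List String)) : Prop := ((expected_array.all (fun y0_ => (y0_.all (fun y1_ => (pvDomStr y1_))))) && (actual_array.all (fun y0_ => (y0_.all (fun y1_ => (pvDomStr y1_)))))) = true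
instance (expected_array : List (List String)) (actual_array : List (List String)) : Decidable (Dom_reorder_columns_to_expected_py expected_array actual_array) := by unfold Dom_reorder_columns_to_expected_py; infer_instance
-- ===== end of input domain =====

-- B replaces A's stateful greedy matcher (per-name scan skipping a 'used' set) by a stateless
-- occurrence-rank computation guarded by one global sorted-multiset check; objective: alternative.

-- ===== PORT A =====
-- inner 'for j, col in enumerate(have)' loop: first index not in 'used' whose stripped name matches
def pvScanA (used : List Int) (name : String) : List (Int × String) → Option Int
  | [] => none
  | (j, col) :: rest =>
    if used.contains j then pvScanA used name rest
    else if PySem.Str.strip col == PySem.Str.strip name then some j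
    else pvScanA used name rest

-- outer 'for name in wanted' loop; Python's 'used' set: only membership is observed, kept as the list of added indices
def pvBuildA (E : List (Int × String)) : List String → List Int → List Int → Option (List Int)
  | [], _, mapping => some mapping
  | name :: rest, used, mapping =>
    match pvScanA used name E with
    | none => none
    | some j => pvBuildA E rest (j :: used) (mapping ++ [j])

def pvBuildColumnMappingA (expected_header actual_header : List String) : Option (List Int) :=
  if expected_header.length ≠ actual_header.length then none
  else pvBuildA (PySem.List.enumerate actual_header) expected_header [] []

def reorder_columns_to_expected_py (expected_array : List (List String)) (actual_array : List (List String)) : List (List String) :=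
  match expected_array, actual_array with
  | [], _ => actual_array
  | _, [] => actual_array
  | eh :: _, ah :: _ =>
    if PySem.List.sorted eh (fun x => x) false ≠ PySem.List.sorted ah (fun x => x) false then actual_array
    else match pvBuildColumnMappingA eh ah with
      | none => actual_array
      | some mapping =>
          actual_array.map (fun r => mapping.map (fun i => if i < (r.length : Int) then PySem.List.pyGetD r i "" else ""))

-- ===== PORT B =====
-- '[j for j, t in enumerate(strips_a) if t == s][strips_e[:i].count(s)] for i, s in enumerate(strips_e)'
-- the [k] index is in range whenever the preceding sorted-strips check passed (proved below), so getD 0 is never taken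
def pvBuildColumnMappingB (expected_header actual_header : List String) : Option (List Int) :=
  if expected_header.length ≠ actual_header.length then none
  else
    let se := expected_header.map PySem.Str.strip
    let sa := actual_header.map PySem.Str.strip
    if PySem.List.sorted se (fun x => x) false ≠ PySem.List.sorted sa (fun x => x) false then none
    else some ((PySem.List.enumerate se).map (fun p =>
      (PySem.List.pyGet?
        (((PySem.List.enumerate sa).filter (fun q => q.2 == p.2)).map (fun q => q.1))
        (((PySem.List.slice se none (some p.1)).count p.2 : Int))).getD 0))

def reorder_columns_to_expected_py_alt (expected_array : List (List String)) (actual_array : List (List String)) : List (List String) :=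
  let mapping : Option (List Int) :=
    if expected_array ≠ [] ∧ actual_array ≠ [] ∧
        PySem.List.sorted (expected_array.headD []) (fun x => x) false
          = PySem.List.sorted (actual_array.headD []) (fun x => x) false
    then pvBuildColumnMappingB (expected_array.headD []) (actual_array.headD [])
    else none
  match mapping with
  | none => actual_array
  | some m => actual_array.map (fun row => m.map (fun i => if i < (row.length : Int) then PySem.List.pyGetD row i "" else ""))

-- ===== PRECONDITION & SPEC =====
def Spec_reorder_columns_to_expected_py (expected_array : List (List String)) (actual_array : List (List String)) (out : List (List String)) : Prop := out = reorder_columns_to_expected_py_alt expected_array actual_array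
instance (expected_array : List (List String)) (actual_array : List (List String)) (out : List (List String)) : Decidable (Spec_reorder_columns_to_expected_py expected_array actual_array out) := by unfold Spec_reorder_columns_to_expected_py; infer_instance

-- ===== CLAIM (what is proved, stated in full; the proofs are below) =====
def Claim_equal_reorder_columns_to_expected_py : Prop := ∀ (expected_array : List (List String)) (actual_array : List (List String)), Dom_reorder_columns_to_expected_py expected_array actual_array → Spec_reorder_columns_to_expected_py expected_array actual_array (reorder_columns_to_expected_py expected_array actual_array)

-- ===== LEMMAS AND PROOFS =====

-- the ascending index list of the occurrences of stripped name s in the actual header ah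
def pvQ (ah : List String) (s : String) : List Int :=
  ((PySem.List.enumerate ah).filter (fun p => PySem.Str.strip p.2 == s)).map (fun p => p.1)

-- A's inner scan is: head of the unused matching entries
theorem pvScanA_eq (used : List Int) (name : String) (E : List (Int × String)) :
    pvScanA used name E =
      ((E.filter (fun p => !(used.contains p.1) && (PySem.Str.strip p.2 == PySem.Str.strip name))).head?).map (·.1) := by
  induction E with
  | nil => rfl
  | cons p rest ih =>
    obtain ⟨j, col⟩ := p
    simp only [pvScanA, List.filter_cons]
    by_cases hu : used.contains j = true
    · have hp : (!(used.contains (j, col).1) && (PySem.Str.strip (j, col).2 == PySem.Str.strip name)) = false := by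
        show (!(used.contains j) && _) = false
        rw [hu]; rfl
      rw [if_pos hu, hp]
      simp only [Bool.false_eq_true, if_false]
      exact ih
    · have hu' : used.contains j = false := Bool.eq_false_iff.mpr hu
      have hp : (!(used.contains (j, col).1) && (PySem.Str.strip (j, col).2 == PySem.Str.strip name)) = (PySem.Str.strip col == PySem.Str.strip name) := by
        show (!(used.contains j) && _) = _
        rw [hu']; exact Bool.true_and _
      rw [if_neg hu, hp]
      by_cases hss : (PySem.Str.strip col == PySem.Str.strip name) = true
      · rw [if_pos hss, if_pos hss]
        simp only [List.head?_cons, Option.map_some]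
      · rw [if_neg hss, if_neg hss]
        exact ih

-- enumerate commutes with map on the payload
theorem pvEnumMap (f : String → String) (l : List String) (s : Int) :
    PySem.List.enumerate (l.map f) s = (PySem.List.enumerate l s).map (fun p => (p.1, f p.2)) := by
  induction l generalizing s with
  | nil => rfl
  | cons x xs ih => simp [PySem.List.enumerate_cons, ih]

-- B's occurrence list equals pvQ
theorem pvQ_eq (ah : List String) (s : String) :
    ((PySem.List.enumerate (ah.map PySem.Str.strip)).filter (fun q => q.2 == s)).map (fun q => q.1) = pvQ ah s := by
  rw [pvEnumMap, List.filter_map, List.map_map]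
  rfl

theorem pvQ_length (ah : List String) (s : String) :
    (pvQ ah s).length = (ah.map PySem.Str.strip).count s := by
  rw [pvQ, List.length_map, ← List.countP_eq_length_filter]
  conv_rhs => rw [List.count_eq_countP, ← PySem.List.map_snd_enumerate ah 0]
  rw [List.countP_map, List.countP_map]
  exact List.countP_congr (fun x _ => Iff.rfl)

theorem pvQ_pairwise (ah : List String) (s : String) : (pvQ ah s).Pairwise (· < ·) := by
  unfold pvQ
  exact List.Pairwise.map (fun p : Int × String => p.1) (fun a b h => h) (List.Pairwise.filter _ (PySem.List.pairwise_lt_enumerate ah 0))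

theorem pvQ_disjoint (ah : List String) (s t : String) (hst : s ≠ t) (j : Int) :
    j ∈ pvQ ah s → j ∉ pvQ ah t := by
  intro hjs hjt
  obtain ⟨p, hp, hpj⟩ := List.mem_map.mp hjs
  obtain ⟨q, hq, hqj⟩ := List.mem_map.mp hjt
  have hp' := List.mem_filter.mp hp
  have hq' := List.mem_filter.mp hq
  have hnd : ((PySem.List.enumerate ah 0).map (fun p : Int × String => p.1)).Nodup := by
    have h : ((PySem.List.enumerate ah 0).map (fun p : Int × String => p.1)).Pairwise ((· < ·) : Int → Int → Prop) :=
      List.Pairwise.map (fun p : Int × String => p.1) (fun a b h => h) (PySem.List.pairwise_lt_enumerate ah 0)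
    exact h.imp (fun h => ne_of_lt h)
  have : p = q := List.inj_on_of_nodup_map hnd hp'.1 hq'.1 (by rw [hpj, hqj])
  apply hst
  have h1 := hp'.2; have h2 := hq'.2
  simp only [beq_iff_eq] at h1 h2
  rw [← h1, this, h2]

-- main loop lemma: A's greedy loop produces exactly B's occurrence-rank values
theorem pvBuildA_eq (eh ah : List String) :
    ∀ (wanted pre : List String) (used mapping : List Int),
      eh.map PySem.Str.strip = pre ++ wanted.map PySem.Str.strip →
      (∀ s, (pre ++ wanted.map PySem.Str.strip).count s ≤ (ah.map PySem.Str.strip).count s) →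
      (∀ s, ((PySem.List.enumerate ah).filter
                (fun p => !(used.contains p.1) && (PySem.Str.strip p.2 == s))).map (fun p => p.1)
              = (pvQ ah s).drop (pre.count s)) →
      pvBuildA (PySem.List.enumerate ah) wanted used mapping
        = some (mapping ++ ((PySem.List.enumerate (wanted.map PySem.Str.strip) (pre.length : Int)).map (fun p =>
            ((PySem.List.pyGet? (pvQ ah p.2)
              (((PySem.List.slice (eh.map PySem.Str.strip) none (some p.1)).count p.2 : Int))).getD 0)))) := by
  intro wanted
  induction wanted with
  | nil =>
    intro pre used mapping _ _ _
    simp [pvBuildA, PySem.List.enumerate_nil]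
  | cons name rest ih =>
    intro pre used mapping hse hcount hinv
    set s := PySem.Str.strip name with hsdef
    set k := pre.count s with hk
    have hklen : k < (pvQ ah s).length := by
      have h1 := hcount s
      rw [pvQ_length]
      rw [List.count_append, List.map_cons, List.count_cons] at h1
      simp only [← hsdef, ← hk, beq_self_eq_true, if_true] at h1
      omega
    have hdrop : (pvQ ah s).drop k = (pvQ ah s)[k] :: (pvQ ah s).drop (k+1) :=
      List.drop_eq_getElem_cons hklen
    set j := (pvQ ah s)[k] with hj
    have hjmem : j ∈ pvQ ah s := hj ▸ List.getElem_mem hklen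
    have hscan : pvScanA used name (PySem.List.enumerate ah) = some j := by
      rw [pvScanA_eq, ← List.head?_map, ← hsdef, hinv s, ← hk, hdrop]
      rfl
    -- the new filter (with j marked used) is the old one with index j removed
    have hfilt : ∀ t, ((PySem.List.enumerate ah).filter
          (fun p => !((j :: used).contains p.1) && (PySem.Str.strip p.2 == t))).map (fun p => p.1)
        = ((pvQ ah t).drop (pre.count t)).filter (fun x => !(x == j)) := by
      intro t
      have hpred : ∀ p ∈ PySem.List.enumerate ah,
          (!((j :: used).contains p.1) && (PySem.Str.strip p.2 == t))
            = ((fun x => !(x == j)) ((fun p : Int × String => p.1) p)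
                && (!(used.contains p.1) && (PySem.Str.strip p.2 == t))) := by
        intro p _
        simp only [List.contains_cons, Bool.not_or]
        cases h1 : (p.1 == j) <;> cases h2 : used.contains p.1 <;>
          cases h3 : (PySem.Str.strip p.2 == t) <;> rfl
      rw [List.filter_congr hpred, ← List.filter_filter,
          show (fun x : Int × String => (fun x : Int => !(x == j)) ((fun p : Int × String => p.1) x))
            = ((fun x : Int => !(x == j)) ∘ (fun p : Int × String => p.1)) from rfl,
          ← List.filter_map, hinv t]
    have hQnodup : (pvQ ah s).Nodup := (pvQ_pairwise ah s).imp (fun h => ne_of_lt h)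
    have hjdrop : j ∉ (pvQ ah s).drop (k + 1) := by
      have h2 : ((pvQ ah s).drop k).Nodup := hQnodup.sublist (List.drop_sublist k _)
      rw [hdrop] at h2
      exact (List.nodup_cons.mp h2).1
    have hinv' : ∀ t, ((PySem.List.enumerate ah).filter
          (fun p => !((j :: used).contains p.1) && (PySem.Str.strip p.2 == t))).map (fun p => p.1)
        = (pvQ ah t).drop ((pre ++ [s]).count t) := by
      intro t
      rw [hfilt t, List.count_append]
      by_cases hts : t = s
      · subst hts
        have hnotin : ∀ x ∈ (pvQ ah s).drop (k + 1), (!(x == j)) = true := by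
          intro x hx
          have hxj : x ≠ j := fun hxj => hjdrop (hxj ▸ hx)
          simp [hxj]
        have h1 : List.count s [s] = 1 := by simp
        rw [h1, ← hk, hdrop, List.filter_cons]
        simp only [beq_self_eq_true, Bool.not_true, Bool.false_eq_true, if_false]
        exact List.filter_eq_self.mpr hnotin
      · have h0 : (List.count t [s]) = 0 := by
          have hst : ¬ s = t := fun h => hts h.symm
          simp [hst]
        rw [h0, Nat.add_zero]
        refine List.filter_eq_self.mpr (fun x hx => ?_)
        have hxQ : x ∈ pvQ ah t := List.mem_of_mem_drop hx
        have hxj : x ≠ j := by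
          intro h
          exact pvQ_disjoint ah s t (fun hst => hts hst.symm) j hjmem (h ▸ hxQ)
        simp [hxj]
    have hse' : eh.map PySem.Str.strip = (pre ++ [s]) ++ rest.map PySem.Str.strip := by
      rw [hse]; simp [← hsdef, List.append_assoc]
    have hcount' : ∀ t, ((pre ++ [s]) ++ rest.map PySem.Str.strip).count t
        ≤ (ah.map PySem.Str.strip).count t := by
      intro t
      have h1 := hcount t
      simp only [List.map_cons, ← hsdef] at h1
      simpa [List.append_assoc] using h1
    have hrec := ih (pre ++ [s]) (j :: used) (mapping ++ [j]) hse' hcount' hinv'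
    -- head element of B's comprehension at global index pre.length is j
    have hhead : ((PySem.List.pyGet? (pvQ ah s)
          (((PySem.List.slice (eh.map PySem.Str.strip) none (some (pre.length : Int))).count s : Int))).getD 0) = j := by
      rw [PySem.List.slice_to_natCast, hse, List.take_left, ← hk, PySem.List.pyGet?_natCast,
          List.getElem?_eq_getElem hklen]
      rfl
    have hstart : (((pre ++ [s]).length : Nat) : Int) = (pre.length : Int) + 1 := by
      simp [List.length_append]
    simp only [pvBuildA, hscan]
    rw [hrec]
    simp only [List.map_cons, PySem.List.enumerate_cons, List.map_cons, ← hsdef, hstart]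
    rw [hhead]
    simp [List.append_assoc]

-- under the wrapper's sorted-equality check the two mapping builders agree
theorem pvMapping_eq (eh ah : List String)
    (hs : PySem.List.sorted eh (fun x => x) false = PySem.List.sorted ah (fun x => x) false) :
    pvBuildColumnMappingA eh ah = pvBuildColumnMappingB eh ah := by
  have hperm : eh.Perm ah := Iff.mp (PySem.List.sorted_id_eq_sorted_id_iff_perm eh ah) hs
  have hlen : eh.length = ah.length := hperm.length_eq
  have hperm' : (eh.map PySem.Str.strip).Perm (ah.map PySem.Str.strip) :=
    hperm.map PySem.Str.strip
  have hsorted' : PySem.List.sorted (eh.map PySem.Str.strip) (fun x => x) false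
      = PySem.List.sorted (ah.map PySem.Str.strip) (fun x => x) false :=
    Iff.mpr (PySem.List.sorted_id_eq_sorted_id_iff_perm (eh.map PySem.Str.strip) (ah.map PySem.Str.strip)) hperm'
  have hbuild := pvBuildA_eq eh ah eh [] [] []
    (List.nil_append _).symm
    (fun t => by simpa using le_of_eq (hperm'.count_eq t))
    (fun t => by
      rw [List.count_nil, List.drop_zero]
      have hp : ∀ p ∈ PySem.List.enumerate ah,
          (!(([] : List Int).contains p.1) && (PySem.Str.strip p.2 == t))
            = (PySem.Str.strip p.2 == t) := fun p _ => rfl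
      rw [List.filter_congr hp]
      rfl)
  unfold pvBuildColumnMappingA pvBuildColumnMappingB
  simp only [hlen, ne_eq, not_true_eq_false, if_false, hsorted']
  rw [hbuild]
  simp only [List.nil_append, List.length_nil, Nat.cast_zero, pvQ_eq]

-- ===== VERDICT (by name: the statement is the Claim_ definition above) =====
theorem reorder_columns_to_expected_py_spec : Claim_equal_reorder_columns_to_expected_py := by
  intro expected_array actual_array _
  unfold Spec_reorder_columns_to_expected_py reorder_columns_to_expected_py reorder_columns_to_expected_py_alt
  cases expected_array with
  | nil => rfl
  | cons eh et =>
    cases actual_array with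
    | nil => rfl
    | cons ah at_ =>
      by_cases hs : PySem.List.sorted eh (fun x => x) false = PySem.List.sorted ah (fun x => x) false
      · simp only [List.headD_cons, ne_eq, reduceCtorEq, not_false_eq_true, hs, and_self, if_true,
          if_neg (by simp : ¬ ¬ True), ← pvMapping_eq eh ah hs]
      · simp [hs]
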